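-- pv_equiv track=rewrite | github.com/pabloschwarzenberg/grader | tema10_ej3/tema10_ej3_78070443e10d9a27e5ae3ce443f2055f.py | buscar_diagonal
-- ===== SOURCE A (Python) =====
-- def buscar_diagonal(sopa, palabra):
--     n_filas = len(sopa)
--     n_columnas = len(sopa[0])
--
--     for fila in range(n_filas - len(palabra) + 1):
--         for columna in range(n_columnas - len(palabra) + 1):
--             if all(sopa[fila+i][columna+i] == palabra[i] for i in range(len(palabra))):
--                 return [fila, columna], "diagonal"
--     return None
-- ===== SOURCE B (Python) =====
-- def buscar_diagonal(sopa, palabra):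
--     R = len(sopa)
--     C = len(sopa[0])
--     m = len(palabra)
--     if m == 0:
--         return [0, 0], "diagonal"
--     pat = list(palabra)
--     starts = [(0, j) for j in range(C)] + [(i, 0) for i in range(1, R)]
--     cands = []
--     for f0, c0 in starts:
--         L = min(R - f0, C - c0)
--         diag = [sopa[f0 + t][c0 + t] for t in range(L)]
--         for p in range(L - m + 1):
--             if diag[p:p + m] == pat:
--                 cands.append((f0 + p, c0 + p))
--     if not cands:
--         return None
--     f, c = min(cands)
--     return [f, c], "diagonal"
-- ===== Notes on version B (the rewrite author's own statement) =====
-- stated objective: alternative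
-- what changed: B traverses the grid by diagonals (building each down-right diagonal once and scanning it for the word), collects all matching start cells and returns the lexicographic minimum, instead of A's row-major double loop that re-checks a diagonal window from every cell and returns on the first hit.
-- outside the precondition, e.g. on buscar_diagonal([['a', 'b'], ['c']], 'xy'): A returns None, B raises IndexError
import Mathlib
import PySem

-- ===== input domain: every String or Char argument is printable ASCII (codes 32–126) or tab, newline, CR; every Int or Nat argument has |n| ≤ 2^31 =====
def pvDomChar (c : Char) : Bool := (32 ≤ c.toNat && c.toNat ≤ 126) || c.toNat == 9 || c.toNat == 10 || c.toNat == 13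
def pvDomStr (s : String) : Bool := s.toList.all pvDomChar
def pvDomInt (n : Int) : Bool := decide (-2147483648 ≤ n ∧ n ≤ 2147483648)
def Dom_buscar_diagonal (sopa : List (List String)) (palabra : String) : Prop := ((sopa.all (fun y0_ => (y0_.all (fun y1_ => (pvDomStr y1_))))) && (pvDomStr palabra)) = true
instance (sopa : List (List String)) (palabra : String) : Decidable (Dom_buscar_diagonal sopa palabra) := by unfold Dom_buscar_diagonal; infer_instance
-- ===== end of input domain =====

-- B is an alternative exact re-implementation: it traverses the grid by down-right
-- diagonals, collects every matching start cell and returns the lexicographically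
-- least one, instead of A's row-major double scan with early return.
-- Equivalence is about the return value on rectangular-enough non-empty grids (Pre_).

-- shared cell accessor: sopa[f][c] (both Pythons index the grid exactly like this; total form, in range under Pre_)
def pvCell (sopa : List (List String)) (f c : Int) : String :=
  PySem.List.pyGetD (PySem.List.pyGetD sopa f []) c ""

-- palabra[i] as a 1-character string (in range whenever used, under the loop bounds)
def pvChar (palabra : String) (i : Int) : String :=
  ((PySem.Str.pyGet? palabra i).map (fun ch => String.ofList [ch])).getD ""

-- ===== PORT A =====
def buscar_diagonal (sopa : List (List String)) (palabra : String) : Option (List Int × String) :=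
  let n_filas : Int := sopa.length
  let n_columnas : Int := ((PySem.List.pyGet? sopa 0).getD []).length
  let m : Int := palabra.toList.length
  (PySem.List.pyRange 0 (n_filas - m + 1) 1).findSome? (fun fila =>
    (PySem.List.pyRange 0 (n_columnas - m + 1) 1).findSome? (fun columna =>
      if (PySem.List.pyRange 0 m 1).all (fun i =>
            pvCell sopa (fila + i) (columna + i) == pvChar palabra i)
      then some ([fila, columna], "diagonal") else none))

-- ===== PORT B =====
def buscar_diagonal_alt (sopa : List (List String)) (palabra : String) : Option (List Int × String) :=
  let R : Int := sopa.length
  let C : Int := ((PySem.List.pyGet? sopa 0).getD []).length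
  let m : Int := palabra.toList.length
  if m = 0 then some ([0, 0], "diagonal")
  else
    let pat : List String := palabra.toList.map (fun ch => String.ofList [ch])
    let starts : List (Int × Int) :=
      (PySem.List.pyRange 0 C 1).map (fun j => ((0 : Int), j)) ++
      (PySem.List.pyRange 1 R 1).map (fun i => (i, (0 : Int)))
    let cands : List (Int × Int) := starts.foldl (fun acc s =>
      let L : Int := min (R - s.1) (C - s.2)
      let diag : List String := (PySem.List.pyRange 0 L 1).map (fun t => pvCell sopa (s.1 + t) (s.2 + t))
      acc ++ (PySem.List.pyRange 0 (L - m + 1) 1).foldl (fun acc2 p =>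
        if PySem.List.slice diag (some p) (some (p + m)) == pat
        then acc2 ++ [(s.1 + p, s.2 + p)] else acc2) []) []
    match PySem.List.min2? cands Prod.fst Prod.snd with
    | none => none
    | some fc => some ([fc.1, fc.2], "diagonal")

-- ===== PRECONDITION & SPEC =====
-- Pre_ excludes the empty grid (A raises IndexError on sopa[0]) and grids with a row
-- shorter than the first row, on which A's diagonal indexing can raise IndexError
-- (on some such ragged grids A still returns None; B walks whole diagonals there and raises).
def Pre_buscar_diagonal (sopa : List (List String)) (palabra : String) : Prop :=
  sopa ≠ [] ∧ ∀ row ∈ sopa, (sopa.headD []).length ≤ row.length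
instance (sopa : List (List String)) (palabra : String) : Decidable (Pre_buscar_diagonal sopa palabra) := by unfold Pre_buscar_diagonal; infer_instance

def pvWitness_buscar_diagonal : List (List String) × String := ([["a", "b"], ["x", "a"]], "aa")

def Spec_buscar_diagonal (sopa : List (List String)) (palabra : String) (out : Option (List Int × String)) : Prop := out = buscar_diagonal_alt sopa palabra
instance (sopa : List (List String)) (palabra : String) (out : Option (List Int × String)) : Decidable (Spec_buscar_diagonal sopa palabra out) := by unfold Spec_buscar_diagonal; infer_instance

-- ===== CLAIM (what is proved, stated in full; the proofs are below) =====
def Claim_equal_buscar_diagonal : Prop := ∀ (sopa : List (List String)) (palabra : String), Dom_buscar_diagonal sopa palabra → Pre_buscar_diagonal sopa palabra → Spec_buscar_diagonal sopa palabra (buscar_diagonal sopa palabra)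


-- ===== LEMMAS AND PROOFS =====

def pvM (palabra : String) : Int := palabra.toList.length
def pvR (sopa : List (List String)) : Int := sopa.length
def pvC (sopa : List (List String)) : Int := ((PySem.List.pyGet? sopa 0).getD []).length
def pvEmbed (fc : Int × Int) : List Int × String := ([fc.1, fc.2], "diagonal")
def pvTest (sopa : List (List String)) (palabra : String) (f c : Int) : Bool :=
  (PySem.List.pyRange 0 (pvM palabra) 1).all (fun i =>
    pvCell sopa (f + i) (c + i) == pvChar palabra i)
def pvPairs (sopa : List (List String)) (palabra : String) : List (Int × Int) :=
  (PySem.List.pyRange 0 (pvR sopa - pvM palabra + 1) 1).flatMap (fun f =>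
    (PySem.List.pyRange 0 (pvC sopa - pvM palabra + 1) 1).map (fun c => (f, c)))
def pvS (sopa : List (List String)) (palabra : String) : List (Int × Int) :=
  (pvPairs sopa palabra).filter (fun fc => pvTest sopa palabra fc.1 fc.2)
theorem pv_findSome_if {α β : Type} (l : List α) (p : α → Bool) (g : α → β) :
    l.findSome? (fun x => if p x then some (g x) else none) = (l.find? p).map g := by
  induction l with
  | nil => rfl
  | cons x t ih =>
    simp only [List.findSome?_cons, List.find?_cons]
    cases hpx : p x <;> simp [ih]
theorem pv_findSome_nested {α β γ : Type} (xs : List α) (ys : List β)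
    (p : α → β → Bool) (g : α → β → γ) :
    xs.findSome? (fun a => ((ys.find? (p a)).map (g a))) =
      ((xs.flatMap (fun a => ys.map (Prod.mk a))).find? (fun q => p q.1 q.2)).map
        (fun q => g q.1 q.2) := by
  induction xs with
  | nil => simp
  | cons a t ih =>
    simp only [List.findSome?_cons, List.flatMap_cons, List.find?_append, List.find?_map]
    have hc : ((fun q : α × β => p q.1 q.2) ∘ Prod.mk a) = p a := rfl
    rw [hc]
    cases hy : ys.find? (p a) with
    | some b => simp
    | none => simp [ih]

theorem pv_A_eq (sopa : List (List String)) (palabra : String) :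
    buscar_diagonal sopa palabra = ((pvS sopa palabra).head?).map pvEmbed := by
  simp only [buscar_diagonal]
  simp only [pv_findSome_if]
  rw [pv_findSome_nested (p := fun fila columna => (PySem.List.pyRange 0 (palabra.toList.length : Int) 1).all (fun i => pvCell sopa (fila + i) (columna + i) == pvChar palabra i)) (g := fun fila columna => (([fila, columna] : List Int), ("diagonal" : String)))]
  rw [pvS, List.head?_filter]
  rfl
def pvCond (sopa : List (List String)) (palabra : String) (f c : Int) : Prop :=
  0 ≤ f ∧ 0 ≤ c ∧ f + pvM palabra ≤ pvR sopa ∧ c + pvM palabra ≤ pvC sopa ∧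
    pvTest sopa palabra f c = true
def pvLexlt (a b : Int × Int) : Prop := a.1 < b.1 ∨ (a.1 = b.1 ∧ a.2 < b.2)
def pvLexle (a b : Int × Int) : Prop := a.1 < b.1 ∨ (a.1 = b.1 ∧ a.2 ≤ b.2)

theorem pv_mem_S (sopa : List (List String)) (palabra : String) (fc : Int × Int) :
    fc ∈ pvS sopa palabra ↔ pvCond sopa palabra fc.1 fc.2 := by
  obtain ⟨f, c⟩ := fc
  simp only [pvS, pvPairs, pvCond, List.mem_filter, List.mem_flatMap, List.mem_map,
    PySem.List.mem_pyRange_one, Prod.mk.injEq]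
  constructor
  · rintro ⟨⟨f', ⟨hf1, hf2⟩, c', ⟨hc1, hc2⟩, rfl, rfl⟩, ht⟩
    exact ⟨hf1, hc1, by omega, by omega, ht⟩
  · rintro ⟨h1, h2, h3, h4, ht⟩
    exact ⟨⟨f, ⟨h1, by omega⟩, c, ⟨h2, by omega⟩, rfl, rfl⟩, ht⟩

theorem pv_S_pairwise (sopa : List (List String)) (palabra : String) :
    (pvS sopa palabra).Pairwise pvLexlt := by
  apply List.Pairwise.filter
  rw [pvPairs, List.flatMap_def]
  rw [List.pairwise_flatten]
  refine ⟨?_, ?_⟩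
  · intro l hl
    simp only [List.mem_map] at hl
    obtain ⟨f, _, rfl⟩ := hl
    exact (PySem.List.pairwise_lt_pyRange_one 0 (pvC sopa - pvM palabra + 1) ).map _
      (fun a b hab => Or.inr ⟨rfl, hab⟩)
  · refine List.Pairwise.map _ ?_ (PySem.List.pairwise_lt_pyRange_one 0 (pvR sopa - pvM palabra + 1))
    intro f1 f2 h12 x hx y hy
    simp only [List.mem_map] at hx hy
    obtain ⟨c1, _, rfl⟩ := hx
    obtain ⟨c2, _, rfl⟩ := hy
    exact Or.inl h12
def pvStep (acc : Option (Int × Int)) (x : Int × Int) : Option (Int × Int) :=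
  acc.elim (some x) (fun m =>
    if (decide (x.1 < m.1) || !decide (m.1 < x.1) && decide (x.2 < m.2)) = true
    then some x else some m)

theorem pv_min2_eq_foldl (l : List (Int × Int)) :
    PySem.List.min2? l Prod.fst Prod.snd = l.foldl pvStep none := by
  unfold PySem.List.min2? pvStep
  congr 1
  funext acc x
  cases acc <;> rfl

theorem pv_min2_aux (l : List (Int × Int)) :
    ∀ a : Int × Int, ∃ q, l.foldl pvStep (some a) = some q ∧
      (q = a ∨ q ∈ l) ∧ pvLexle q a ∧ ∀ x ∈ l, pvLexle q x := by
  induction l with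
  | nil => intro a; exact ⟨a, rfl, Or.inl rfl, Or.inr ⟨rfl, le_refl _⟩, by simp⟩
  | cons x t ih =>
    intro a
    simp only [List.foldl_cons]
    by_cases hx : (decide (x.1 < a.1) || !decide (a.1 < x.1) && decide (x.2 < a.2)) = true
    · rw [show pvStep (some a) x = some x by simp only [pvStep, Option.elim]; rw [if_pos hx]]
      obtain ⟨q, hq, hmem, hle, hall⟩ := ih x
      refine ⟨q, hq, ?_, ?_, ?_⟩
      · rcases hmem with rfl | h
        · exact Or.inr List.mem_cons_self
        · exact Or.inr (List.mem_cons_of_mem _ h)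
      · simp only [Bool.or_eq_true, Bool.and_eq_true, Bool.not_eq_true', decide_eq_true_eq,
          decide_eq_false_iff_not] at hx
        rcases hle with h | ⟨h1, h2⟩ <;> rcases hx with h' | ⟨h1', h2'⟩ <;>
          unfold pvLexle <;> omega
      · intro y hy
        rcases List.mem_cons.1 hy with rfl | h
        · exact hle
        · exact hall y h
    · rw [show pvStep (some a) x = some a by simp only [pvStep, Option.elim]; rw [if_neg hx]]
      obtain ⟨q, hq, hmem, hle, hall⟩ := ih a
      refine ⟨q, hq, ?_, hle, ?_⟩
      · rcases hmem with rfl | h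
        · exact Or.inl rfl
        · exact Or.inr (List.mem_cons_of_mem _ h)
      · intro y hy
        rcases List.mem_cons.1 hy with rfl | h
        · simp only [Bool.or_eq_true, Bool.and_eq_true, Bool.not_eq_true', decide_eq_true_eq,
            decide_eq_false_iff_not] at hx
          rcases hle with h' | ⟨h1, h2⟩ <;> unfold pvLexle <;> omega
        · exact hall y h

theorem pv_min2_spec (l : List (Int × Int)) (h : l ≠ []) :
    ∃ q, PySem.List.min2? l Prod.fst Prod.snd = some q ∧ q ∈ l ∧ ∀ x ∈ l, pvLexle q x := by
  obtain ⟨a, t, rfl⟩ := List.exists_cons_of_ne_nil h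
  rw [pv_min2_eq_foldl, List.foldl_cons]
  obtain ⟨q, hq, hmem, hle, hall⟩ := pv_min2_aux t a
  refine ⟨q, by simpa [pvStep] using hq, ?_, ?_⟩
  · rcases hmem with rfl | hmem
    · exact List.mem_cons_self
    · exact List.mem_cons_of_mem _ hmem
  · intro x hx
    rcases List.mem_cons.1 hx with rfl | hx
    · exact hle
    · exact hall x hx
theorem pv_char_nat (palabra : String) (j : Nat) (hj : j < palabra.toList.length) :
    pvChar palabra (j : Int) = String.ofList [palabra.toList[j]] := by
  unfold pvChar
  rw [show PySem.Str.pyGet? palabra (j:Int) = palabra.toList[j]? by simp [pysem]]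
  rw [List.getElem?_eq_getElem hj]
  rfl

theorem pv_window (sopa : List (List String)) (palabra : String) (f0 c0 p : Int)
    (_hf0 : 0 ≤ f0) (_hc0 : 0 ≤ c0) (hp : 0 ≤ p)
    (hpm : p + pvM palabra ≤ min (pvR sopa - f0) (pvC sopa - c0)) :
    (PySem.List.slice ((PySem.List.pyRange 0 (min (pvR sopa - f0) (pvC sopa - c0)) 1).map
        (fun t => pvCell sopa (f0 + t) (c0 + t))) (some p) (some (p + pvM palabra)) ==
      palabra.toList.map (fun ch => String.ofList [ch])) =
    pvTest sopa palabra (f0 + p) (c0 + p) := by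
  have hm0 : (0:Int) ≤ pvM palabra := by unfold pvM; positivity
  set L : Int := min (pvR sopa - f0) (pvC sopa - c0) with hL
  have hL0 : 0 ≤ L := le_trans (by omega) hpm
  set mn : Nat := palabra.toList.length with hmn
  have hmI : pvM palabra = (mn : Int) := rfl
  set pn : Nat := p.toNat with hpn
  have hpI : p = (pn : Int) := by omega
  set Ln : Nat := L.toNat with hLn
  have hLI : L = (Ln : Int) := by omega
  have hwin : pn + mn ≤ Ln := by omega
  rw [PySem.List.slice_toNat _ hp (by omega)]
  rw [show (p + pvM palabra).toNat - p.toNat = mn by omega]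
  rw [hLI, PySem.List.pyRange_zero_nat, List.map_map]
  set g : Nat → String := fun k => pvCell sopa (f0 + k) (c0 + k) with hg
  have hgc : ((fun t => pvCell sopa (f0 + t) (c0 + t)) ∘ fun k : Nat => (k : Int)) = g := rfl
  rw [hgc]
  set diagL : List String := (List.range Ln).map g with hdiag
  have hlenDiag : diagL.length = Ln := by simp [hdiag]
  have hlenA : (List.take mn (List.drop pn diagL)).length = mn := by
    simp [hlenDiag]; omega
  have hlenB : (palabra.toList.map (fun ch => String.ofList [ch])).length = mn := by rw [List.length_map]
  rw [Bool.eq_iff_iff, beq_iff_eq]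
  unfold pvTest
  rw [List.all_eq_true]
  constructor
  · intro h i hi
    rw [PySem.List.mem_pyRange_one] at hi
    set j : Nat := i.toNat with hj
    have hiI : i = (j : Int) := by omega
    have hjm : j < mn := by omega
    have hpt := List.getElem_of_eq h (i := j) (by rw [hlenA]; exact hjm)
    simp only [List.getElem_take, List.getElem_drop, hdiag, List.getElem_map,
      List.getElem_range, hg] at hpt
    rw [hiI, beq_iff_eq, pv_char_nat palabra j hjm]
    rw [show f0 + p + (j:Int) = f0 + ((pn + j : Nat) : Int) by push_cast; omega]
    rw [show c0 + p + (j:Int) = c0 + ((pn + j : Nat) : Int) by push_cast; omega]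
    exact hpt
  · intro h
    apply List.ext_getElem (by rw [hlenA, hlenB])
    intro j h1 h2
    have hjm : j < mn := by omega
    have hx := h ((j : Nat) : Int) (by rw [PySem.List.mem_pyRange_one]; omega)
    rw [beq_iff_eq, pv_char_nat palabra j hjm] at hx
    simp only [List.getElem_take, List.getElem_drop, hdiag, List.getElem_map,
      List.getElem_range, hg]
    rw [show f0 + ((pn + j : Nat) : Int) = f0 + p + (j:Int) by push_cast; omega]
    rw [show c0 + ((pn + j : Nat) : Int) = c0 + p + (j:Int) by push_cast; omega]
    exact hx
theorem pv_m_pos (palabra : String) (hm : pvM palabra ≠ 0) : (1:Int) ≤ pvM palabra := by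
  have : (0:Int) ≤ pvM palabra := by unfold pvM; positivity
  omega

theorem pv_mem_cands (sopa : List (List String)) (palabra : String)
    (hm : pvM palabra ≠ 0) (x : Int × Int) :
    x ∈ (((PySem.List.pyRange 0 (pvC sopa) 1).map (fun j => ((0 : Int), j)) ++
          (PySem.List.pyRange 1 (pvR sopa) 1).map (fun i => (i, (0 : Int)))).foldl (fun acc s =>
        acc ++ (PySem.List.pyRange 0 (min (pvR sopa - s.1) (pvC sopa - s.2) - pvM palabra + 1) 1).foldl
          (fun acc2 p =>
            if PySem.List.slice ((PySem.List.pyRange 0 (min (pvR sopa - s.1) (pvC sopa - s.2)) 1).map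
                  (fun t => pvCell sopa (s.1 + t) (s.2 + t))) (some p) (some (p + pvM palabra)) ==
                palabra.toList.map (fun ch => String.ofList [ch])
            then acc2 ++ [(s.1 + p, s.2 + p)] else acc2) []) []) ↔
      pvCond sopa palabra x.1 x.2 := by
  have hm1 := pv_m_pos palabra hm
  obtain ⟨f, c⟩ := x
  simp only [PySem.List.foldl_append_if, PySem.List.foldl_append_eq_flatMap, List.nil_append,
    List.mem_flatMap]
  constructor
  · rintro ⟨s, hs, hx⟩
    simp only [List.mem_append, List.mem_map, PySem.List.mem_pyRange_one] at hs
    simp only [List.mem_map, List.mem_filter, PySem.List.mem_pyRange_one] at hx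
    obtain ⟨p, ⟨⟨hp0, hpub⟩, hsl⟩, hfc⟩ := hx
    have hf0 : 0 ≤ s.1 := by rcases hs with ⟨j, hj, rfl⟩ | ⟨i, hi, rfl⟩ <;> simp <;> omega
    have hc0 : 0 ≤ s.2 := by rcases hs with ⟨j, hj, rfl⟩ | ⟨i, hi, rfl⟩ <;> simp <;> omega
    have hsR : s.1 < pvR sopa ∨ s.2 < pvC sopa → True := fun _ => trivial
    have hwin : p + pvM palabra ≤ min (pvR sopa - s.1) (pvC sopa - s.2) := by omega
    rw [pv_window sopa palabra s.1 s.2 p hf0 hc0 hp0 hwin] at hsl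
    obtain ⟨rfl, rfl⟩ : s.1 + p = f ∧ s.2 + p = c := by
      simpa [Prod.ext_iff] using hfc
    exact ⟨by omega, by omega, by omega, by omega, hsl⟩
  · rintro ⟨h1, h2, h3, h4, ht⟩
    by_cases hfc : f ≤ c
    · refine ⟨((0:Int), c - f), ?_, ?_⟩
      · simp only [List.mem_append, List.mem_map, PySem.List.mem_pyRange_one]
        exact Or.inl ⟨c - f, ⟨by omega, by omega⟩, rfl⟩
      · simp only [List.mem_map, List.mem_filter, PySem.List.mem_pyRange_one]
        refine ⟨f, ⟨⟨by omega, by omega⟩, ?_⟩, ?_⟩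
        · rw [pv_window sopa palabra 0 (c - f) f (by omega) (by omega) (by omega) (by omega)]
          rw [show (0:Int) + f = f by ring, show c - f + f = c by ring]
          exact ht
        · simp only [Prod.mk.injEq]; constructor <;> ring
    · refine ⟨(f - c, (0:Int)), ?_, ?_⟩
      · simp only [List.mem_append, List.mem_map, PySem.List.mem_pyRange_one]
        exact Or.inr ⟨f - c, ⟨by omega, by omega⟩, rfl⟩
      · simp only [List.mem_map, List.mem_filter, PySem.List.mem_pyRange_one]
        refine ⟨c, ⟨⟨by omega, by omega⟩, ?_⟩, ?_⟩
        · rw [pv_window sopa palabra (f - c) 0 c (by omega) (by omega) (by omega) (by omega)]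
          rw [show f - c + c = f by ring, show (0:Int) + c = c by ring]
          exact ht
        · simp only [Prod.mk.injEq]; constructor <;> ring
theorem pv_B_eq (sopa : List (List String)) (palabra : String) (hm : pvM palabra ≠ 0) :
    buscar_diagonal_alt sopa palabra = ((pvS sopa palabra).head?).map pvEmbed := by
  have hcands : buscar_diagonal_alt sopa palabra =
      (match PySem.List.min2? (((PySem.List.pyRange 0 (pvC sopa) 1).map (fun j => ((0 : Int), j)) ++
          (PySem.List.pyRange 1 (pvR sopa) 1).map (fun i => (i, (0 : Int)))).foldl (fun acc s =>
        acc ++ (PySem.List.pyRange 0 (min (pvR sopa - s.1) (pvC sopa - s.2) - pvM palabra + 1) 1).foldl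
          (fun acc2 p =>
            if PySem.List.slice ((PySem.List.pyRange 0 (min (pvR sopa - s.1) (pvC sopa - s.2)) 1).map
                  (fun t => pvCell sopa (s.1 + t) (s.2 + t))) (some p) (some (p + pvM palabra)) ==
                palabra.toList.map (fun ch => String.ofList [ch])
            then acc2 ++ [(s.1 + p, s.2 + p)] else acc2) []) []) Prod.fst Prod.snd with
       | none => none
       | some fc => some (([fc.1, fc.2] : List Int), ("diagonal" : String))) := by
    simp only [buscar_diagonal_alt]
    rw [if_neg (show ¬((palabra.toList.length : Int) = 0) from hm)]
    rfl
  rw [hcands]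
  rcases hS : (pvS sopa palabra).head? with _ | q
  · have hnil : pvS sopa palabra = [] := List.head?_eq_none_iff.1 hS
    have hcnil : (((PySem.List.pyRange 0 (pvC sopa) 1).map (fun j => ((0 : Int), j)) ++
          (PySem.List.pyRange 1 (pvR sopa) 1).map (fun i => (i, (0 : Int)))).foldl (fun acc s =>
        acc ++ (PySem.List.pyRange 0 (min (pvR sopa - s.1) (pvC sopa - s.2) - pvM palabra + 1) 1).foldl
          (fun acc2 p =>
            if PySem.List.slice ((PySem.List.pyRange 0 (min (pvR sopa - s.1) (pvC sopa - s.2)) 1).map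
                  (fun t => pvCell sopa (s.1 + t) (s.2 + t))) (some p) (some (p + pvM palabra)) ==
                palabra.toList.map (fun ch => String.ofList [ch])
            then acc2 ++ [(s.1 + p, s.2 + p)] else acc2) []) []) = [] := by
      rw [List.eq_nil_iff_forall_not_mem]
      intro x hx
      have h1 := (pv_mem_cands sopa palabra hm x).1 hx
      have h2 := (pv_mem_S sopa palabra x).2 h1
      rw [hnil] at h2
      exact List.not_mem_nil h2
    rw [hcnil]
    rfl
  · obtain ⟨t, ht⟩ := List.head?_eq_some_iff.1 hS
    have hqS : q ∈ pvS sopa palabra := by rw [ht]; exact List.mem_cons_self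
    have hqC := (pv_mem_S sopa palabra q).1 hqS
    have hqmem := (pv_mem_cands sopa palabra hm q).2 hqC
    have hne := List.ne_nil_of_mem hqmem
    obtain ⟨r, hr, hrmem, hrmin⟩ := pv_min2_spec _ hne
    have hrS : r ∈ pvS sopa palabra := (pv_mem_S sopa palabra r).2 ((pv_mem_cands sopa palabra hm r).1 hrmem)
    have hqmin : ∀ x ∈ pvS sopa palabra, pvLexle q x := by
      have hpw := pv_S_pairwise sopa palabra
      rw [ht, List.pairwise_cons] at hpw
      intro x hx
      rw [ht] at hx
      rcases List.mem_cons.1 hx with rfl | hx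
      · exact Or.inr ⟨rfl, le_refl _⟩
      · rcases hpw.1 x hx with h | ⟨h1, h2⟩
        · exact Or.inl h
        · exact Or.inr ⟨h1, le_of_lt h2⟩
    have h1 : pvLexle r q := hrmin q hqmem
    have h2 : pvLexle q r := hqmin r hrS
    have hrq : r = q := by
      have : r.1 = q.1 ∧ r.2 = q.2 := by
        rcases h1 with h | ⟨ha, hb⟩ <;> rcases h2 with h' | ⟨ha', hb'⟩ <;> constructor <;> omega
      exact Prod.ext this.1 this.2
    rw [hr, hrq]
    rfl

-- the empty word: both return the cell (0, 0) on a non-empty grid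
theorem pv_empty_word (sopa : List (List String)) (palabra : String)
    (hm : pvM palabra = 0) (hR : sopa ≠ []) :
    buscar_diagonal sopa palabra = buscar_diagonal_alt sopa palabra := by
  have hmz : (palabra.toList.length : Int) = 0 := hm
  have hRp : 0 < (sopa.length : Int) := by
    have := List.length_pos_iff.2 hR
    omega
  simp only [buscar_diagonal, buscar_diagonal_alt]
  rw [if_pos hmz]
  rw [show PySem.List.pyRange 0 ((palabra.toList.length : Nat) : Int) 1 = [] from by
    rw [hmz]; exact PySem.List.pyRange_one_eq_nil (le_refl 0)]
  rw [PySem.List.pyRange_one_cons (show (0:Int) <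
    ↑((PySem.List.pyGet? sopa 0).getD []).length - ↑palabra.toList.length + 1 by omega)]
  rw [PySem.List.pyRange_one_cons (show (0:Int) <
    ↑sopa.length - ↑palabra.toList.length + 1 by omega)]
  simp

-- ===== VERDICT (by name: the statement is the Claim_ definition above) =====
theorem buscar_diagonal_spec : Claim_equal_buscar_diagonal := by
  intro sopa palabra _ hPre
  unfold Spec_buscar_diagonal
  by_cases hm : pvM palabra = 0
  · exact pv_empty_word sopa palabra hm hPre.1
  · rw [pv_A_eq, pv_B_eq sopa palabra hm]
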